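-- pv_equiv track=rewrite | github.com/jihunkeom/Seek2Skim | s2s_gen/models/modeling_t5.py | compute_decoder_macs
-- ===== SOURCE A (Python) =====
-- def compute_decoder_macs(step, vocab_size, num_layers, enc_sentence_lengths, dec_sentence_lengths, dim):
--     def _layer_mac(step, enc_seq_len, dec_seq_len, dim):
--         self_attn_mac = 2 * dec_seq_len * dim
--         self_attn_mac += 4 * (dim ** 2)
--         if step == 1:
--             cross_attn_mac = 2 * enc_seq_len * (dim ** 2)
--         else:
--             cross_attn_mac = 0
--         cross_attn_mac += 2 * (dim ** 2)
--         cross_attn_mac += 2 * dim * enc_seq_len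
--         ffn_mac = 8 * (dim ** 2)
--         return self_attn_mac + cross_attn_mac + ffn_mac
--
--     mac = 0
--     for i in range(num_layers):
--         enc_seq_len = enc_sentence_lengths[i]
--         dec_seq_len = dec_sentence_lengths[i]
--         mac += _layer_mac(step, enc_seq_len, dec_seq_len, dim)
--     mac += (dim * vocab_size)
--
--     return mac
-- ===== SOURCE B (Python) =====
-- def compute_decoder_macs(step, vocab_size, num_layers, enc_sentence_lengths, dec_sentence_lengths, dim):
--     n = max(num_layers, 0)
--     sum_enc = sum(enc_sentence_lengths[:n])
--     sum_dec = sum(dec_sentence_lengths[:n])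
--     cross = 2 * dim ** 2 * sum_enc if step == 1 else 0
--     return 14 * dim ** 2 * n + 2 * dim * (sum_enc + sum_dec) + cross + dim * vocab_size
-- ===== Notes on version B (the rewrite author's own statement) =====
-- stated objective: simpler
-- what changed: Replaces per-layer evaluation of the full MAC expression (inner helper called once per layer) with two aggregate sums over the length lists plus one closed-form formula.
import Mathlib
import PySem

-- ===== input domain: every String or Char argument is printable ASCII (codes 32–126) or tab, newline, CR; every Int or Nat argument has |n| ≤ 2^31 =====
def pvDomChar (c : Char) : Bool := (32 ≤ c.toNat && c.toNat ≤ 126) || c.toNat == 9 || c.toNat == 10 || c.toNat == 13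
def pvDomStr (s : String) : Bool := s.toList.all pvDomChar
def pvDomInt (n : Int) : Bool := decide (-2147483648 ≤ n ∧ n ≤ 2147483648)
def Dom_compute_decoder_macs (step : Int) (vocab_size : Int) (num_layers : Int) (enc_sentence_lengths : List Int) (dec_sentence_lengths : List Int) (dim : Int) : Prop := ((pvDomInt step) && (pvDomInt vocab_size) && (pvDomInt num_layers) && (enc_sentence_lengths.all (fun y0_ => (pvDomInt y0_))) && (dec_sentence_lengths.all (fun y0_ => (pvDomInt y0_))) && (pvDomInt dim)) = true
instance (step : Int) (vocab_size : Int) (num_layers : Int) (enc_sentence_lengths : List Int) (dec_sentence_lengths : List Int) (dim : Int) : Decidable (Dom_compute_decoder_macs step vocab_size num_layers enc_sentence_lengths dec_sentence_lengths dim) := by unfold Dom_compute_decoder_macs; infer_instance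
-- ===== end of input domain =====

-- B replaces the per-layer evaluation of the full MAC expression with two aggregate
-- sums over the length lists plus one closed-form formula (objective: simpler).

-- ===== PORT A =====
-- inner helper _layer_mac of A, transliterated
def pvLayerMac (step : Int) (enc_seq_len : Int) (dec_seq_len : Int) (dim : Int) : Int :=
  let self_attn_mac := 2 * dec_seq_len * dim + 4 * dim ^ 2
  let cross_attn_mac :=
    (if step == 1 then 2 * enc_seq_len * dim ^ 2 else 0) + 2 * dim ^ 2 + 2 * dim * enc_seq_len
  let ffn_mac := 8 * dim ^ 2
  self_attn_mac + cross_attn_mac + ffn_mac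

def compute_decoder_macs (step : Int) (vocab_size : Int) (num_layers : Int) (enc_sentence_lengths : List Int) (dec_sentence_lengths : List Int) (dim : Int) : Int :=
  let mac := (PySem.List.pyRange 0 num_layers 1).foldl
    (fun mac i =>
      let enc_seq_len := PySem.List.pyGetD enc_sentence_lengths i 0
      let dec_seq_len := PySem.List.pyGetD dec_sentence_lengths i 0
      mac + pvLayerMac step enc_seq_len dec_seq_len dim) 0
  mac + dim * vocab_size

-- ===== PORT B =====
def compute_decoder_macs_alt (step : Int) (vocab_size : Int) (num_layers : Int) (enc_sentence_lengths : List Int) (dec_sentence_lengths : List Int) (dim : Int) : Int :=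
  let n := max num_layers 0
  let sum_enc := (PySem.List.slice enc_sentence_lengths none (some n)).sum
  let sum_dec := (PySem.List.slice dec_sentence_lengths none (some n)).sum
  let cross := if step == 1 then 2 * dim ^ 2 * sum_enc else 0
  14 * dim ^ 2 * n + 2 * dim * (sum_enc + sum_dec) + cross + dim * vocab_size

-- ===== PRECONDITION & SPEC =====
-- A raises IndexError when num_layers exceeds the length of either list; exactly those inputs are excluded.
def Pre_compute_decoder_macs (step : Int) (vocab_size : Int) (num_layers : Int) (enc_sentence_lengths : List Int) (dec_sentence_lengths : List Int) (dim : Int) : Prop :=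
  num_layers ≤ (enc_sentence_lengths.length : Int) ∧ num_layers ≤ (dec_sentence_lengths.length : Int)
instance (step : Int) (vocab_size : Int) (num_layers : Int) (enc_sentence_lengths : List Int) (dec_sentence_lengths : List Int) (dim : Int) : Decidable (Pre_compute_decoder_macs step vocab_size num_layers enc_sentence_lengths dec_sentence_lengths dim) := by unfold Pre_compute_decoder_macs; infer_instance
def pvWitness_compute_decoder_macs : Int × Int × Int × List Int × List Int × Int := (1, 100, 2, [3, 4], [5, 6], 7)

def Spec_compute_decoder_macs (step : Int) (vocab_size : Int) (num_layers : Int) (enc_sentence_lengths : List Int) (dec_sentence_lengths : List Int) (dim : Int) (out : Int) : Prop := out = compute_decoder_macs_alt step vocab_size num_layers enc_sentence_lengths dec_sentence_lengths dim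
instance (step : Int) (vocab_size : Int) (num_layers : Int) (enc_sentence_lengths : List Int) (dec_sentence_lengths : List Int) (dim : Int) (out : Int) : Decidable (Spec_compute_decoder_macs step vocab_size num_layers enc_sentence_lengths dec_sentence_lengths dim out) := by unfold Spec_compute_decoder_macs; infer_instance

-- ===== CLAIM (what is proved, stated in full; the proofs are below) =====
def Claim_equal_compute_decoder_macs : Prop := ∀ (step : Int) (vocab_size : Int) (num_layers : Int) (enc_sentence_lengths : List Int) (dec_sentence_lengths : List Int) (dim : Int), Dom_compute_decoder_macs step vocab_size num_layers enc_sentence_lengths dec_sentence_lengths dim → Pre_compute_decoder_macs step vocab_size num_layers enc_sentence_lengths dec_sentence_lengths dim → Spec_compute_decoder_macs step vocab_size num_layers enc_sentence_lengths dec_sentence_lengths dim (compute_decoder_macs step vocab_size num_layers enc_sentence_lengths dec_sentence_lengths dim)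

-- ===== LEMMAS AND PROOFS =====

-- A's loop, over the first m layers, equals B's closed form of the aggregate sums.
lemma pv_loop_eq_sums (step dim : Int) (enc dec : List Int) :
    ∀ (m : Nat), m ≤ enc.length → m ≤ dec.length →
    (List.range m).foldl
      (fun (mac : Int) (k : Nat) => mac + pvLayerMac step (PySem.List.pyGetD enc (k : Int) 0) (PySem.List.pyGetD dec (k : Int) 0) dim) 0
    = 14 * dim ^ 2 * m + 2 * dim * ((enc.take m).sum + (dec.take m).sum)
        + (if step == 1 then 2 * dim ^ 2 * (enc.take m).sum else 0) := by
  intro m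
  induction m with
  | zero => intro _ _; simp
  | succ m ih =>
    intro h1 h2
    have hm1 : m < enc.length := by omega
    have hm2 : m < dec.length := by omega
    rw [List.range_succ, List.foldl_append, ih (by omega) (by omega)]
    simp only [List.foldl_cons, List.foldl_nil, PySem.List.pyGetD_natCast,
      List.getD_eq_getElem _ _ hm1, List.getD_eq_getElem _ _ hm2,
      List.take_add_one, List.getElem?_eq_getElem hm1, List.getElem?_eq_getElem hm2,
      Option.toList_some, List.sum_append, List.sum_cons, List.sum_nil]
    by_cases hs : step == 1 <;> simp [hs, pvLayerMac] <;> ring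

theorem compute_decoder_macs_spec_aux (step vocab_size num_layers : Int)
    (enc dec : List Int) (dim : Int)
    (h1 : num_layers ≤ (enc.length : Int)) (h2 : num_layers ≤ (dec.length : Int)) :
    compute_decoder_macs step vocab_size num_layers enc dec dim
    = compute_decoder_macs_alt step vocab_size num_layers enc dec dim := by
  unfold compute_decoder_macs compute_decoder_macs_alt
  by_cases hn : 0 ≤ num_layers
  · obtain ⟨m, rfl⟩ : ∃ m : Nat, num_layers = (m : Int) := ⟨num_layers.toNat, (Int.toNat_of_nonneg hn).symm⟩
    have hmax : max (m : Int) 0 = (m : Int) := by omega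
    have hme : m ≤ enc.length := by exact_mod_cast h1
    have hmd : m ≤ dec.length := by exact_mod_cast h2
    rw [PySem.List.pyRange_one]
    have hT : ((m : Int) - 0).toNat = m := by omega
    rw [hT, List.foldl_map]
    simp only [zero_add, hmax, PySem.List.slice_to_natCast]
    rw [pv_loop_eq_sums step dim enc dec m hme hmd]
  · have hr : PySem.List.pyRange 0 num_layers 1 = [] := by
      rw [PySem.List.pyRange_one]
      have : (num_layers - 0).toNat = 0 := by omega
      rw [this]; simp
    have hmax : max num_layers 0 = 0 := by omega
    have he : PySem.List.slice enc none (some (0:Int)) = enc.take 0 := by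
      simpa using PySem.List.slice_to_natCast enc 0
    have hd : PySem.List.slice dec none (some (0:Int)) = dec.take 0 := by
      simpa using PySem.List.slice_to_natCast dec 0
    rw [hr, hmax]
    simp only [List.foldl_nil, he, hd, List.take_zero, List.sum_nil]
    by_cases hs : step == 1 <;> simp [hs]

-- ===== VERDICT (by name: the statement is the Claim_ definition above) =====
theorem compute_decoder_macs_spec : Claim_equal_compute_decoder_macs := by
  intro step vocab_size num_layers enc dec dim _ hpre
  unfold Spec_compute_decoder_macs
  exact compute_decoder_macs_spec_aux step vocab_size num_layers enc dec dim hpre.1 hpre.2
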